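-- pv_equiv track=rewrite | github.com/MMMJB/arbitrage-attempt | triangular_testing.py | get_chain_from_id
-- ===== SOURCE A (Python) =====
-- from typing import Union, Tuple
--
-- def get_chain_from_id(exchanges: list[str], id: Union[int, None]) -> str:
--     num_exchanges = len(exchanges)
--     exchanges_pool = [exchange.split("-")[0] for exchange in exchanges]
--     exchanges_list = []
--
--     if id is None:
--         return "unknown"
--
--     for i in range(num_exchanges):
--         if id > 0:
--             exchanges_list.append(exchanges_pool[(id + i) % num_exchanges])
--         else:
--             exchanges_list.append(exchanges_pool[(-id - i) % num_exchanges])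
--
--     return " -> ".join(exchanges_list)
-- ===== SOURCE B (Python) =====
-- def get_chain_from_id(exchanges, id):
--     pool = [exchange.split("-")[0] for exchange in exchanges]
--
--     if id is None:
--         return "unknown"
--
--     n = len(exchanges)
--     if n == 0:
--         return ""
--
--     if id > 0:
--         r = id % n
--         rotated = pool[r:] + pool[:r]
--     else:
--         s = (-id) % n
--         rotated = pool[:s + 1][::-1] + pool[s + 1:][::-1]
--
--     return " -> ".join(rotated)
-- ===== Notes on version B (the rewrite author's own statement) =====
-- stated objective: idiomatic
-- what changed: Replaces the per-index modular-arithmetic loop with slice arithmetic: compute the rotation offset once with a single modulo, then build the chain as pool[r:]+pool[:r] for positive id and as two reversed slices for non-positive id, plus an explicit early return for the empty list.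
import Mathlib
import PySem

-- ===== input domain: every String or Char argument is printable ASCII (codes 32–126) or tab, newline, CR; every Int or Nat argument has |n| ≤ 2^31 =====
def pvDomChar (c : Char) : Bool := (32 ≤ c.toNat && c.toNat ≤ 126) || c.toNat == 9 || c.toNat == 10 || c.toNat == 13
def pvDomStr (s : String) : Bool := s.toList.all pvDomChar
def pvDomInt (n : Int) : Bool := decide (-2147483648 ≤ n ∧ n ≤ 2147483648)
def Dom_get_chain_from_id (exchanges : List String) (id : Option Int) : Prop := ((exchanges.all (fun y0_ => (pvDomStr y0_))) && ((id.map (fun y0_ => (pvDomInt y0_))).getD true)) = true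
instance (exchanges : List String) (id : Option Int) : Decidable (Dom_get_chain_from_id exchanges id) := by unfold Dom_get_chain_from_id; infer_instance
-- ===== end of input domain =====

-- B replaces A's per-index modular loop by slice arithmetic (rotate by drop/take for positive id,
-- two reversed slices for non-positive id); objective: idiomatic, same cost.

-- ===== PORT A =====
-- exchange.split("-")[0] : split? never returns none for a non-empty separator, and the
-- resulting list is never empty, so the getD defaults are never reached.
def get_chain_from_id (exchanges : List String) (id : Option Int) : String :=
  let num_exchanges : Int := exchanges.length
  let exchanges_pool : List String :=
    exchanges.map (fun exchange =>
      (PySem.List.pyGet? ((PySem.Str.split? exchange "-").getD []) 0).getD "")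
  match id with
  | none => "unknown"
  | some id =>
    -- for i in range(num_exchanges): append pool[(id+i)%n] (id>0) / pool[(-id-i)%n] (else);
    -- the index is always in range, so the pyGet? default is never reached.
    let exchanges_list : List String :=
      (PySem.List.pyRange 0 num_exchanges 1).foldl (fun acc i =>
        if id > 0 then
          acc ++ [(PySem.List.pyGet? exchanges_pool (PySem.Int.mod (id + i) num_exchanges)).getD ""]
        else
          acc ++ [(PySem.List.pyGet? exchanges_pool (PySem.Int.mod (-id - i) num_exchanges)).getD ""]) []
    PySem.Str.join " -> " exchanges_list

-- ===== PORT B =====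
def get_chain_from_id_alt (exchanges : List String) (id : Option Int) : String :=
  let pool : List String :=
    exchanges.map (fun exchange =>
      (PySem.List.pyGet? ((PySem.Str.split? exchange "-").getD []) 0).getD "")
  match id with
  | none => "unknown"
  | some id =>
    let n : Int := exchanges.length
    if n == 0 then ""
    else if id > 0 then
      let r := PySem.Int.mod id n
      -- pool[r:] + pool[:r]
      PySem.Str.join " -> "
        (PySem.List.slice pool (some r) none ++ PySem.List.slice pool none (some r))
    else
      let s := PySem.Int.mod (-id) n
      -- pool[:s+1][::-1] + pool[s+1:][::-1]  ([::-1] has step -1 ≠ 0, so slice? is never none)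
      PySem.Str.join " -> "
        ((PySem.List.slice? (PySem.List.slice pool none (some (s + 1))) none none (-1)).getD [] ++
         (PySem.List.slice? (PySem.List.slice pool (some (s + 1)) none) none none (-1)).getD [])

-- ===== PRECONDITION & SPEC =====
def Spec_get_chain_from_id (exchanges : List String) (id : Option Int) (out : String) : Prop := out = get_chain_from_id_alt exchanges id
instance (exchanges : List String) (id : Option Int) (out : String) : Decidable (Spec_get_chain_from_id exchanges id out) := by unfold Spec_get_chain_from_id; infer_instance

-- ===== CLAIM (what is proved, stated in full; the proofs are below) =====
def Claim_equal_get_chain_from_id : Prop := ∀ (exchanges : List String) (id : Option Int), Dom_get_chain_from_id exchanges id → Spec_get_chain_from_id exchanges id (get_chain_from_id exchanges id)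

-- ===== LEMMAS AND PROOFS =====

theorem pv_foldl_append_map {α β : Type} (f : α → β) :
    ∀ (l : List α) (init : List β),
      l.foldl (fun acc i => acc ++ [f i]) init = init ++ l.map f := by
  intro l
  induction l with
  | nil => intro init; simp
  | cons x xs ih => intro init; simp [List.foldl_cons, ih]

-- getD-of-getElem? equals getElem when the indices agree
theorem pv_get_eq (pool : List String) (i j : Nat) (hj : j < pool.length) (h : i = j) :
    (pool[i]?).getD "" = pool[j] := by
  subst h; rw [List.getElem?_eq_getElem hj]; rfl

-- shift the base of a modular index: (a + j) % m = (a % m + j) % m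
theorem pv_emod_shift (a j m : Int) : (a + j) % m = (a % m + j) % m := by
  conv_lhs => rw [← Int.emod_add_mul_ediv a m]
  rw [show a % m + m * (a / m) + j = a % m + j + m * (a / m) by ring,
    Int.add_mul_emod_self_left]

-- positive-id rotation: the modular-index traversal IS drop r ++ take r
theorem pv_rot_pos (pool : List String) (id : Int) (hm : 0 < pool.length) :
    (List.range pool.length).map
        (fun (k : Nat) => (pool[(((id + (k : Int)) % (pool.length : Int)).toNat)]?).getD "")
      = pool.drop (id % (pool.length : Int)).toNat
        ++ pool.take (id % (pool.length : Int)).toNat := by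
  set m := pool.length with hmdef
  have hmI : (0 : Int) < (m : Int) := by exact_mod_cast hm
  have hr0 : 0 ≤ id % (m : Int) := Int.emod_nonneg id (by omega)
  have hrm : id % (m : Int) < (m : Int) := Int.emod_lt_of_pos id hmI
  set r := (id % (m : Int)).toNat with hrdef
  have hrm' : r < m := by omega
  apply List.ext_getElem
  · simp; omega
  · intro j hj1 hj2
    have hjm : j < m := by simpa using hj1
    have hkey : (id + (j : Int)) % (m : Int) = ((r : Int) + j) % m := by
      rw [pv_emod_shift]; congr 1; omega
    by_cases hcase : j < m - r
    · have h2 : ((r : Int) + j) % m = (r : Int) + j :=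
        Int.emod_eq_of_lt (by omega) (by omega)
      have ht : ((r : Int) + j).toNat = r + j := by omega
      rw [List.getElem_map, List.getElem_range, List.getElem_append_left (by simp; omega),
        List.getElem_drop, hkey, h2, ht]
      apply pv_get_eq
      all_goals omega
    · have h2 : ((r : Int) + j) % m = (r : Int) + j - m := by
        have hstep : ((r : Int) + j) % m = ((r : Int) + j - m) % m := by
          conv_lhs => rw [show ((r : Int) + j) = ((r : Int) + j - m) + (m : Int) * 1 by ring]
          rw [Int.add_mul_emod_self_left]
        rw [hstep]
        exact Int.emod_eq_of_lt (by omega) (by omega)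
      have ht : ((r : Int) + j - m).toNat = r + j - m := by omega
      rw [List.getElem_map, List.getElem_range,
        List.getElem_append_right (by simp; omega), hkey, h2, ht,
        List.getElem_take]
      apply pv_get_eq
      all_goals (first | omega | (simp only [List.length_drop]; omega))

-- non-positive-id traversal: descending modular indices ARE two reversed slices
theorem pv_rot_neg (pool : List String) (id : Int) (hm : 0 < pool.length) :
    (List.range pool.length).map
        (fun (k : Nat) => (pool[(((-id - (k : Int)) % (pool.length : Int)).toNat)]?).getD "")
      = (pool.take ((-id % (pool.length : Int)).toNat + 1)).reverse
        ++ (pool.drop ((-id % (pool.length : Int)).toNat + 1)).reverse := by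
  set m := pool.length with hmdef
  have hmI : (0 : Int) < (m : Int) := by exact_mod_cast hm
  have hs0 : 0 ≤ -id % (m : Int) := Int.emod_nonneg _ (by omega)
  have hsm : -id % (m : Int) < (m : Int) := Int.emod_lt_of_pos _ hmI
  set s := (-id % (m : Int)).toNat with hsdef
  have hsm' : s < m := by omega
  apply List.ext_getElem
  · simp; omega
  · intro j hj1 hj2
    have hjm : j < m := by simpa using hj1
    have hkey : (-id - (j : Int)) % (m : Int) = ((s : Int) - j) % m := by
      rw [show (-id - (j : Int)) = (-id) + (-(j : Int)) by ring, pv_emod_shift]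
      congr 1; omega
    by_cases hcase : j ≤ s
    · have h2 : ((s : Int) - j) % m = (s : Int) - j :=
        Int.emod_eq_of_lt (by omega) (by omega)
      have ht : ((s : Int) - j).toNat = s - j := by omega
      rw [List.getElem_map, List.getElem_range,
        List.getElem_append_left (by simp; omega), hkey, h2, ht,
        List.getElem_reverse, List.getElem_take]
      apply pv_get_eq
      all_goals (first | omega | (simp only [List.length_take]; omega))
    · have h2 : ((s : Int) - j) % m = (s : Int) - j + m := by
        have hstep : ((s : Int) - j) % m = ((s : Int) - j + m) % m := by
          conv_lhs => rw [show ((s : Int) - j) = ((s : Int) - j + m) + (m : Int) * (-1) by ring]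
          rw [Int.add_mul_emod_self_left]
        rw [hstep]
        exact Int.emod_eq_of_lt (by omega) (by omega)
      have ht : ((s : Int) - j + m).toNat = s + m - j := by omega
      rw [List.getElem_map, List.getElem_range,
        List.getElem_append_right (by simp; omega), hkey, h2, ht,
        List.getElem_reverse, List.getElem_drop]
      apply pv_get_eq
      all_goals (first | omega | (simp only [List.length_drop, List.length_take, List.length_reverse]; omega))

-- ===== VERDICT (by name: the statement is the Claim_ definition above) =====
theorem get_chain_from_id_spec : Claim_equal_get_chain_from_id := by
  intro exchanges id _
  unfold Spec_get_chain_from_id get_chain_from_id get_chain_from_id_alt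
  cases id with
  | none => rfl
  | some id =>
    simp only
    set pool : List String :=
      exchanges.map (fun exchange =>
        (PySem.List.pyGet? ((PySem.Str.split? exchange "-").getD []) 0).getD "") with hpool
    have hplen : pool.length = exchanges.length := by simp [hpool]
    by_cases hm : exchanges.length = 0
    · -- empty list: A builds [] and joins to ""; B returns "" directly
      simp [hm, PySem.Str.join]
    · have hm0 : 0 < exchanges.length := Nat.pos_of_ne_zero hm
      have hne : ¬ (((exchanges.length : Int)) == 0) = true := by
        simp only [beq_iff_eq]; omega
      rw [if_neg hne]
      have hmI : (0 : Int) < (exchanges.length : Int) := by exact_mod_cast hm0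
      by_cases hid : id > 0
      · simp only [if_pos hid]
        rw [pv_foldl_append_map, List.nil_append,
          PySem.List.pyRange_one 0 (exchanges.length : Int), List.map_map]
        have hr0 : 0 ≤ PySem.Int.mod id (exchanges.length : Int) := by
          rw [PySem.Int.mod_eq_emod_of_pos hmI]
          exact Int.emod_nonneg _ (by omega)
        rw [PySem.List.slice_from _ hr0, PySem.List.slice_to _ hr0]
        have hrot := pv_rot_pos pool id (by omega)
        rw [hplen] at hrot
        rw [PySem.Int.mod_eq_emod_of_pos hmI, ← hrot,
          show ((exchanges.length : Int) - 0).toNat = exchanges.length by omega]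
        congr 1
        apply List.map_congr_left
        intro k _
        simp only [Function.comp_apply, PySem.Int.mod_eq_emod_of_pos hmI]
        have hidx0 : 0 ≤ (id + ((0 : Int) + (k : Int))) % (exchanges.length : Int) :=
          Int.emod_nonneg _ (by omega)
        rw [PySem.List.pyGet?_of_nonneg _ hidx0]
        norm_num
      · simp only [if_neg hid]
        rw [pv_foldl_append_map, List.nil_append,
          PySem.List.pyRange_one 0 (exchanges.length : Int), List.map_map]
        have hs0 : 0 ≤ PySem.Int.mod (-id) (exchanges.length : Int) := by
          rw [PySem.Int.mod_eq_emod_of_pos hmI]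
          exact Int.emod_nonneg _ (by omega)
        have hs1 : 0 ≤ PySem.Int.mod (-id) (exchanges.length : Int) + 1 := by omega
        rw [PySem.List.slice_to _ hs1, PySem.List.slice_from _ hs1,
          PySem.List.slice?_none_none_neg_one, PySem.List.slice?_none_none_neg_one]
        simp only [Option.getD_some]
        have htn : (PySem.Int.mod (-id) (exchanges.length : Int) + 1).toNat
            = (PySem.Int.mod (-id) (exchanges.length : Int)).toNat + 1 := by omega
        rw [htn, PySem.Int.mod_eq_emod_of_pos hmI]
        have hrot := pv_rot_neg pool id (by omega)
        rw [hplen] at hrot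
        rw [← hrot, show ((exchanges.length : Int) - 0).toNat = exchanges.length by omega]
        congr 1
        apply List.map_congr_left
        intro k _
        simp only [Function.comp_apply, PySem.Int.mod_eq_emod_of_pos hmI]
        have hidx0 : 0 ≤ (-id - ((0 : Int) + (k : Int))) % (exchanges.length : Int) :=
          Int.emod_nonneg _ (by omega)
        rw [PySem.List.pyGet?_of_nonneg _ hidx0]
        norm_num
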